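-- pv_equiv track=rewrite | github.com/camwar11/AoC | src/common/cartesianGrid.py | compress_points
-- ===== SOURCE A (Python) =====
-- def compress_points(data: list[tuple[int, int]]) -> list[tuple[tuple[int, int], tuple[int, int]]]:
--     xs: set[int] = set()
--     ys: set[int] = set()
--     for point in data:
--         xs.add(point[0])
--         ys.add(point[1])
--     x_sorted = sorted(xs)
--     y_sorted = sorted(ys)
--     new_points: list[tuple[tuple[int, int], tuple[int, int]]] = []
--
--     for point in data:
--         new_x = x_sorted.index(point[0])
--         new_y = y_sorted.index(point[1])
--         new_points.append(((new_x, new_y), (point[0], point[1])))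
--
--     return new_points
-- ===== SOURCE B (Python) =====
-- def compress_points(data: list[tuple[int, int]]) -> list[tuple[tuple[int, int], tuple[int, int]]]:
--     # Rank of a coordinate = number of distinct coordinate values strictly below it.
--     xs = [p[0] for p in data]
--     ys = [p[1] for p in data]
--
--     def rank(v, vals):
--         return len({u for u in vals if u < v})
--
--     return [((rank(x, xs), rank(y, ys)), (x, y)) for (x, y) in data]
-- ===== Notes on version B (the rewrite author's own statement) =====
-- stated objective: alternative
-- what changed: Replaces A's build-a-set + sort + per-point list.index lookup by computing each coordinate's rank directly as the number of distinct coordinate values strictly below it, with no sorting and no index search.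
import Mathlib
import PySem

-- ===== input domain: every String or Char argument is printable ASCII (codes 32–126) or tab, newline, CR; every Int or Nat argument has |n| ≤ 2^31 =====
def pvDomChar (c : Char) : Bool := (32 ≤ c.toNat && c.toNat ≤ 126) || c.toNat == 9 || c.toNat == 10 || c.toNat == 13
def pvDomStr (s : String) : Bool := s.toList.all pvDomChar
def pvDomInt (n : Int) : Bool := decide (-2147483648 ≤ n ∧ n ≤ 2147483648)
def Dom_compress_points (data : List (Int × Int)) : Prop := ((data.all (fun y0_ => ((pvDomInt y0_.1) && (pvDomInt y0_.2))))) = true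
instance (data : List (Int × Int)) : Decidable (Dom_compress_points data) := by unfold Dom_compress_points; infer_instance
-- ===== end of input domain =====

-- B replaces A's dedup-sort-then-.index lookup by computing each rank directly as the
-- number of distinct coordinate values strictly below it (alternative algorithm, same cost class).

-- ===== PORT A =====
-- list.index(v): v is always a member here (it was added to the set from the same data),
-- so Python's .index never raises; `(index? …).getD 0` is exact on every input.
def compress_points (data : List (Int × Int)) : List ((Int × Int) × (Int × Int)) :=
  let xs : PySem.Set Int := data.foldl (fun s p => PySem.Set.add s p.1) PySem.Set.empty
  let ys : PySem.Set Int := data.foldl (fun s p => PySem.Set.add s p.2) PySem.Set.empty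
  let x_sorted := PySem.List.sorted xs (fun x => x) false
  let y_sorted := PySem.List.sorted ys (fun x => x) false
  data.foldl (fun acc p =>
    let new_x : Int := ((PySem.List.index? x_sorted p.1).getD 0 : Nat)
    let new_y : Int := ((PySem.List.index? y_sorted p.2).getD 0 : Nat)
    acc ++ [((new_x, new_y), (p.1, p.2))]) []

-- ===== PORT B =====
-- len({u for u in vals if u < v})
def pvRank (v : Int) (vals : List Int) : Int :=
  ((PySem.Set.ofList (vals.filter (fun u => decide (u < v)))).length : Nat)

def compress_points_alt (data : List (Int × Int)) : List ((Int × Int) × (Int × Int)) :=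
  let xs := data.map (fun p => p.1)
  let ys := data.map (fun p => p.2)
  data.map (fun p => ((pvRank p.1 xs, pvRank p.2 ys), (p.1, p.2)))

-- ===== PRECONDITION & SPEC =====
def Spec_compress_points (data : List (Int × Int)) (out : List ((Int × Int) × (Int × Int))) : Prop := out = compress_points_alt data
instance (data : List (Int × Int)) (out : List ((Int × Int) × (Int × Int))) : Decidable (Spec_compress_points data out) := by unfold Spec_compress_points; infer_instance

-- ===== CLAIM (what is proved, stated in full; the proofs are below) =====
def Claim_equal_compress_points : Prop := ∀ (data : List (Int × Int)), Dom_compress_points data → Spec_compress_points data (compress_points data)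

-- ===== LEMMAS AND PROOFS =====

-- In a strictly increasing list, the index of a member equals the number of smaller elements.
theorem pv_index_sorted_strict (l : List Int) (hl : l.Pairwise (· < ·)) (v : Int) (hv : v ∈ l) :
    PySem.List.index? l v = some (l.countP (fun u => decide (u < v))) := by
  induction l with
  | nil => cases hv
  | cons a t ih =>
    rcases List.pairwise_cons.mp hl with ⟨ha, ht⟩
    by_cases h : a = v
    · subst h
      rw [PySem.List.index?_cons_self]
      have h0 : t.countP (fun u => decide (u < a)) = 0 := by
        rw [List.countP_eq_zero]
        intro u hu
        simp [not_lt.mpr (le_of_lt (ha u hu))]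
      simp [h0]
    · have hvt : v ∈ t := by
        rcases List.mem_cons.mp hv with h' | h'
        · exact absurd h'.symm h
        · exact h'
      rw [PySem.List.index?_cons_of_ne t h, ih ht hvt]
      simp [ha v hvt]

-- Dedup commutes with filtering for the purpose of length (both nodup, same members).
theorem pv_countP_ofList (vals : List Int) (v : Int) :
    (PySem.Set.ofList vals).countP (fun u => decide (u < v))
      = (PySem.Set.ofList (vals.filter (fun u => decide (u < v)))).length := by
  rw [List.countP_eq_length_filter]
  apply List.Perm.length_eq
  rw [List.perm_ext_iff_of_nodup (List.Nodup.filter _ (PySem.Set.nodup_ofList vals))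
      (PySem.Set.nodup_ofList _)]
  intro a
  simp [List.mem_filter, PySem.Set.mem_ofList, and_comm]

-- A's lookup in the sorted deduplicated list equals B's direct rank.
theorem pv_rank_eq (vals : List Int) (v : Int) (hv : v ∈ vals) :
    (((PySem.List.index? (PySem.List.sorted (PySem.Set.ofList vals) (fun x => x) false) v).getD 0 : Nat) : Int)
      = pvRank v vals := by
  have hmem : v ∈ PySem.List.sorted (PySem.Set.ofList vals) (fun x => x) false := by
    rw [PySem.List.mem_sorted, PySem.Set.mem_ofList]; exact hv
  rw [pv_index_sorted_strict _ (PySem.List.sorted_ofList_pairwise_lt vals) v hmem]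
  have hperm : (PySem.List.sorted (PySem.Set.ofList vals) (fun x => x) false).Perm
      (PySem.Set.ofList vals) := PySem.List.sorted_perm _ _ _
  rw [Option.getD_some, hperm.countP_eq, pv_countP_ofList, pvRank]

-- ===== VERDICT (by name: the statement is the Claim_ definition above) =====
theorem compress_points_spec : Claim_equal_compress_points := by
  intro data _
  unfold Spec_compress_points compress_points compress_points_alt
  have hx : data.foldl (fun s p => PySem.Set.add s p.1) PySem.Set.empty
      = PySem.Set.ofList (data.map (fun p => p.1)) := by
    rw [PySem.Set.ofList_eq_foldl, List.foldl_map]; rfl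
  have hy : data.foldl (fun s p => PySem.Set.add s p.2) PySem.Set.empty
      = PySem.Set.ofList (data.map (fun p => p.2)) := by
    rw [PySem.Set.ofList_eq_foldl, List.foldl_map]; rfl
  simp only [hx, hy, PySem.List.foldl_append_singleton_eq_map, List.nil_append]
  apply List.map_congr_left
  intro p hp
  have h1 := pv_rank_eq (data.map (fun p => p.1)) p.1 (List.mem_map_of_mem hp)
  have h2 := pv_rank_eq (data.map (fun p => p.2)) p.2 (List.mem_map_of_mem hp)
  rw [← h1, ← h2]
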